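-- pv_equiv track=rewrite | github.com/AdamZhouSE/pythonHomework | Code/CodeRecords/2188/60788/261483.py | f
-- ===== SOURCE A (Python) =====
-- def f(a, b, s, t, l, r, K):
--     profit = 0
--     T = a[s - 1:t]
--     P = b[l - 1:r]
--     while True:
--         if T.find(P) >= 0:
--             profit += K - (T.find(P) + s)
--             T = T[0:T.find(P)] + ''.join(['0']*len(P)) + T[T.find(P) + len(P):]
--         else:
--             break
--     return profit
-- ===== SOURCE B (Python) =====
-- def f(a, b, s, t, l, r, K):
--     T = list(a[s - 1:t])
--     P = list(b[l - 1:r])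
--     m = len(P)
--     n = len(T)
--     # after zeroing a window, a new match can only start inside/overlapping it,
--     # and only if P itself contains '0'; otherwise the cursor can jump past it
--     back = m - 1 if '0' in P else 0
--     profit = 0
--     i = 0
--     while i + m <= n:
--         if T[i:i + m] == P:
--             profit += K - (i + s)
--             T[i:i + m] = ['0'] * m
--             i = max(0, i - back) if back else i + m
--         else:
--             i += 1
--     return profit
-- ===== Notes on version B (the rewrite author's own statement) =====
-- stated objective: alternative
-- what changed: Instead of repeatedly re-running find from position 0 and rebuilding the string by concatenation after every match, B makes a cursor-based left-to-right scan over a char list, zeroing each matched window in place and moving the cursor forward (or back by at most len(P)-1 when P contains '0', the only case where zeroing can create a new earlier match).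
import Mathlib
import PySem

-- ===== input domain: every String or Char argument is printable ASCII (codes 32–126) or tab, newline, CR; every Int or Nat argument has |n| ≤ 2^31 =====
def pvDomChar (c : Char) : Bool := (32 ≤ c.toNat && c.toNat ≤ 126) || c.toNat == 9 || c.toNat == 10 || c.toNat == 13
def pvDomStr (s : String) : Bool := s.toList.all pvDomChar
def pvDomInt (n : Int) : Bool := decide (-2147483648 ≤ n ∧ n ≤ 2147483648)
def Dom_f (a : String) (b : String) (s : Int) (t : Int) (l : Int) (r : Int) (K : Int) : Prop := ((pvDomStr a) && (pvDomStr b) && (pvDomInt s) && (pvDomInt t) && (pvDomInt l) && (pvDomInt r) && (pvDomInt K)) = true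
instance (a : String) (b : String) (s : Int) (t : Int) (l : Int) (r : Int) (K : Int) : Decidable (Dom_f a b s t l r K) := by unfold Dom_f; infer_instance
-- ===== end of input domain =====

-- B replaces A's repeated global find + string rebuilding by a single cursor-based scan
-- over a char list, zeroing matched windows in place (objective: alternative algorithm).

-- ===== PORT A =====
-- the 'while True' loop of A; fuel bounds the iterations (each iteration strictly
-- increases the number of '0' chars on Pre_ inputs, so |T|+1 iterations suffice)
def fLoopA (P : List Char) (s K : Int) : Nat → List Char → Int → Int
  | 0, _, profit => profit
  | fuel + 1, T, profit =>
    if PySem.Chars.find T P ≥ 0 then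
      fLoopA P s K fuel
        (PySem.List.slice T (some 0) (some (PySem.Chars.find T P)) ++
          List.replicate P.length '0' ++                    -- ''.join(['0']*len(P))
          PySem.List.slice T (some (PySem.Chars.find T P + (P.length : Int))) none)
        (profit + (K - (PySem.Chars.find T P + s)))
    else profit

def f (a : String) (b : String) (s : Int) (t : Int) (l : Int) (r : Int) (K : Int) : Int :=
  let T := PySem.List.slice a.toList (some (s - 1)) (some t)   -- a[s-1:t]
  let P := PySem.List.slice b.toList (some (l - 1)) (some r)   -- b[l-1:r]
  fLoopA P s K (T.length + 1) T 0

-- ===== PORT B =====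
-- the 'while i + m <= n' loop of Source B; i : Nat (Python's max(0, i - back) is Nat subtraction);
-- T[i:i+m] is (T.drop i).take m (PySem.List.slice_natCast); fuel bounds the scan steps
def fLoopB (P : List Char) (s K : Int) (m back : Nat) : Nat → List Char → Nat → Int → Int
  | 0, _, _, profit => profit
  | fuel + 1, T, i, profit =>
    if i + m ≤ T.length then
      if (T.drop i).take m = P then
        fLoopB P s K m back fuel
          (T.take i ++ List.replicate m '0' ++ T.drop (i + m))   -- T[i:i+m] = ['0']*m
          (if back ≠ 0 then i - back else i + m)                 -- max(0, i-back) if back else i+m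
          (profit + (K - ((i : Int) + s)))
      else fLoopB P s K m back fuel T (i + 1) profit
    else profit

def f_alt (a : String) (b : String) (s : Int) (t : Int) (l : Int) (r : Int) (K : Int) : Int :=
  let T := PySem.List.slice a.toList (some (s - 1)) (some t)
  let P := PySem.List.slice b.toList (some (l - 1)) (some r)
  let m := P.length
  let back := if '0' ∈ P then m - 1 else 0
  fLoopB P s K m back (T.length * m + 2 * T.length + 2) T 0 0

-- ===== PRECONDITION & SPEC =====
-- Pre_f excludes exactly the inputs on which A never returns: the pattern slice P empty
-- (T.find('') is 0 forever, the loop never breaks) or P all '0' and occurring in T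
-- (replacing the match by '0'*len(P) leaves T unchanged) — A diverges in both cases.
def Pre_f (a : String) (b : String) (s : Int) (t : Int) (l : Int) (r : Int) (K : Int) : Prop :=
  let T := PySem.List.slice a.toList (some (s - 1)) (some t)
  let P := PySem.List.slice b.toList (some (l - 1)) (some r)
  P ≠ [] ∧ (P.all (· = '0') = true → PySem.Chars.isIn P T = false)
instance (a : String) (b : String) (s : Int) (t : Int) (l : Int) (r : Int) (K : Int) : Decidable (Pre_f a b s t l r K) := by unfold Pre_f; infer_instance

def pvWitness_f : String × String × Int × Int × Int × Int × Int := ("abcab", "ab", 1, 5, 1, 2, 10)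

def Spec_f (a : String) (b : String) (s : Int) (t : Int) (l : Int) (r : Int) (K : Int) (out : Int) : Prop := out = f_alt a b s t l r K
instance (a : String) (b : String) (s : Int) (t : Int) (l : Int) (r : Int) (K : Int) (out : Int) : Decidable (Spec_f a b s t l r K out) := by unfold Spec_f; infer_instance

-- ===== CLAIM (what is proved, stated in full; the proofs are below) =====
def Claim_equal_f : Prop := ∀ (a : String) (b : String) (s : Int) (t : Int) (l : Int) (r : Int) (K : Int), Dom_f a b s t l r K → Pre_f a b s t l r K → Spec_f a b s t l r K (f a b s t l r K)

-- ===== LEMMAS AND PROOFS =====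

theorem occ_take_iff (P T : List Char) (i : Nat) :
    P <+: T.drop i ↔ (T.drop i).take P.length = P := by
  rw [List.prefix_iff_eq_take]; exact eq_comm

theorem occ_bound {P T : List Char} {p : Nat} (hP : P ≠ []) (h : P <+: T.drop p) :
    p + P.length ≤ T.length := by
  have h1 := h.length_le
  simp only [List.length_drop] at h1
  have h2 : 0 < P.length := List.length_pos_iff.mpr hP
  omega

theorem find_eq_leftmost {P T : List Char} {i : Nat}
    (h0 : P <+: T.drop i) (hmin : ∀ p, p < i → ¬ P <+: T.drop p) :
    PySem.Chars.find T P = (i : Int) := by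
  have hin : PySem.Chars.isIn P T = true :=
    (PySem.Chars.exists_prefix_drop_iff_isIn P T).mp ⟨i, h0⟩
  have hnn : 0 ≤ PySem.Chars.find T P :=
    (PySem.Chars.find_nonneg_iff T P).mpr ((PySem.Chars.isIn_iff_infix P T).mp hin)
  obtain ⟨hpre, hlt⟩ := PySem.Chars.find_spec hnn
  have htn : (PySem.Chars.find T P).toNat = i := by
    rcases Nat.lt_trichotomy (PySem.Chars.find T P).toNat i with h | h | h
    · exact absurd hpre (hmin _ h)
    · exact h
    · exact absurd h0 (hlt i h)
  omega

theorem find_eq_neg {P T : List Char} (h : ∀ p, ¬ P <+: T.drop p) :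
    PySem.Chars.find T P = -1 := by
  apply (PySem.Chars.find_eq_neg_one_iff T P).mpr
  intro hinf
  obtain ⟨j, hj⟩ := (PySem.Chars.exists_prefix_drop_iff_isIn P T).mpr
    ((PySem.Chars.isIn_iff_infix P T).mpr hinf)
  exact h j hj

theorem splice_length {T : List Char} {i m : Nat} (h : i + m ≤ T.length) :
    (T.take i ++ List.replicate m '0' ++ T.drop (i + m)).length = T.length := by
  simp; omega

theorem splice_take {T : List Char} (i m : Nat) (h : i ≤ T.length) :
    (T.take i ++ List.replicate m '0' ++ T.drop (i + m)).take i = T.take i := by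
  rw [List.append_assoc, List.take_left' (by simp; omega)]

theorem take_eq_of_take_eq {A B : List Char} {i p m : Nat} (hpm : p + m ≤ i)
    (h : A.take i = B.take i) : (A.drop p).take m = (B.drop p).take m := by
  have key : ∀ L : List Char, (L.drop p).take m = ((L.take i).drop p).take m := by
    intro L
    rw [List.drop_take, List.take_take, Nat.min_eq_left (by omega)]
  rw [key A, key B, h]

theorem splice_zero_window {T : List Char} {i m q : Nat}
    (hiq : i ≤ q) (hq : q < i + m) (hin : i + m ≤ T.length) :
    (T.take i ++ List.replicate m '0' ++ T.drop (i + m))[q]? = some '0' := by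
  rw [List.append_assoc,
    List.getElem?_append_right (by simp; omega),
    List.getElem?_append_left (by simp; omega) ]
  simp only [List.length_take, List.getElem?_replicate]
  rw [if_pos (by omega)]

theorem no_occ_left {P T : List Char} {i p : Nat}
    (hmin : ∀ q, q < i → ¬ P <+: T.drop q)
    (hi : i ≤ T.length)
    (hp : p + P.length ≤ i) (hP : P ≠ []) :
    ¬ P <+: (T.take i ++ List.replicate P.length '0' ++ T.drop (i + P.length)).drop p := by
  intro h
  rw [occ_take_iff, take_eq_of_take_eq hp (splice_take i P.length hi)] at h
  have hpi : p < i := by have := List.length_pos_iff.mpr hP; omega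
  exact hmin p hpi ((occ_take_iff P T p).mpr h)

theorem no_occ_overlap {P T : List Char} {i p : Nat}
    (h0 : '0' ∉ P) (hin : i + P.length ≤ T.length)
    (h1 : p < i + P.length) (h2 : i < p + P.length) :
    ¬ P <+: (T.take i ++ List.replicate P.length '0' ++ T.drop (i + P.length)).drop p := by
  intro h
  set T' := T.take i ++ List.replicate P.length '0' ++ T.drop (i + P.length) with hT'
  set q := max p i with hqdef
  have hq1 : p ≤ q := le_max_left _ _
  have hq2 : i ≤ q := le_max_right _ _
  have hq3 : q < i + P.length := by rcases max_cases p i with ⟨h', _⟩ | ⟨h', _⟩ <;> omega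
  have hq4 : q - p < P.length := by rcases max_cases p i with ⟨h', _⟩ | ⟨h', _⟩ <;> omega
  have hwin : T'[q]? = some '0' := splice_zero_window hq2 hq3 hin
  have hPq : P[q - p]? = some '0' := by
    have := List.prefix_iff_eq_take.mp h
    rw [this, List.getElem?_take, if_pos hq4, List.getElem?_drop]
    rw [show p + (q - p) = q from by omega]
    exact hwin
  exact h0 (List.mem_of_getElem? hPq)

theorem splice_count {P T : List Char} {i : Nat}
    (hmatch : (T.drop i).take P.length = P)
    (hnall : ¬ P.all (· = '0') = true) :
    T.count '0' + 1 ≤ (T.take i ++ List.replicate P.length '0' ++ T.drop (i + P.length)).count '0' := by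
  have hTsplit : T = T.take i ++ P ++ T.drop (i + P.length) := by
    conv_lhs => rw [← List.take_append_drop i T]
    rw [List.append_assoc]
    congr 1
    conv_lhs => rw [← List.take_append_drop P.length (T.drop i)]
    rw [hmatch, List.drop_drop]
  have hPcount : P.count '0' < P.length := by
    have hle : P.count '0' ≤ P.length := List.count_le_length
    have hne : P.count '0' ≠ P.length := by
      intro he
      apply hnall
      rw [List.all_eq_true]
      intro c hc
      exact decide_eq_true (List.count_eq_length.mp he c hc).symm
    omega
  conv_lhs => rw [hTsplit]
  simp only [List.count_append, List.count_replicate]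
  simp only [BEq.rfl, if_pos]
  omega

theorem loopB_eq_loopA (P : List Char) (s K : Int) (hP : P ≠ []) :
    ∀ fuelB fuelA (T : List Char) (i : Nat) (profit : Int),
    (P.all (· = '0') = true → ∀ p, ¬ P <+: T.drop p) →
    (∀ p, p < i → ¬ P <+: T.drop p) →
    T.length - T.count '0' + 1 ≤ fuelA →
    (T.length - i) + P.length * (T.length - T.count '0') + 1 ≤ fuelB →
    fLoopB P s K P.length (if '0' ∈ P then P.length - 1 else 0) fuelB T i profit
      = fLoopA P s K fuelA T profit := by
  intro fuelB
  induction fuelB with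
  | zero => intro fuelA T i profit _ _ _ hB; omega
  | succ fb ih =>
    intro fuelA T i profit hz hmin hA hB
    obtain ⟨fa, rfl⟩ : ∃ fa, fuelA = fa + 1 := ⟨fuelA - 1, by omega⟩
    have hm1 : 1 ≤ P.length := List.length_pos_iff.mpr hP
    have hzle : T.count '0' ≤ T.length := List.count_le_length
    rw [fLoopB]
    by_cases hcond : i + P.length ≤ T.length
    · rw [if_pos hcond]
      by_cases hmatch : (T.drop i).take P.length = P
      · -- leftmost occurrence at i
        rw [if_pos hmatch]
        have hocc : P <+: T.drop i := (occ_take_iff P T i).mpr hmatch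
        have hfind : PySem.Chars.find T P = (i : Int) := find_eq_leftmost hocc hmin
        have hnall : ¬ P.all (· = '0') = true := fun hall => hz hall i hocc
        rw [fLoopA, hfind, if_pos (by omega : (i : Int) ≥ 0)]
        rw [PySem.List.slice_zero_start, PySem.List.slice_to_natCast,
          show ((i : Int) + (P.length : Int)) = ((i + P.length : Nat) : Int) from by push_cast; ring,
          PySem.List.slice_from_natCast]
        set T' := T.take i ++ List.replicate P.length '0' ++ T.drop (i + P.length) with hT'
        have hlen : T'.length = T.length := splice_length hcond
        have hcnt : T.count '0' + 1 ≤ T'.count '0' := splice_count hmatch hnall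
        have hcle : T'.count '0' ≤ T'.length := List.count_le_length
        have hz' : P.all (· = '0') = true → ∀ p, ¬ P <+: T'.drop p :=
          fun hall => absurd hall hnall
        have hmulle : P.length * (T'.length - T'.count '0') + P.length
            ≤ P.length * (T.length - T.count '0') := by
          have h1 : T'.length - T'.count '0' + 1 ≤ T.length - T.count '0' := by omega
          calc P.length * (T'.length - T'.count '0') + P.length
              = P.length * (T'.length - T'.count '0' + 1) := by ring
            _ ≤ P.length * (T.length - T.count '0') := Nat.mul_le_mul_left _ h1
        by_cases h0P : '0' ∈ P
        · -- P contains '0': cursor backs off by P.length - 1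
          have hm2 : 2 ≤ P.length := by
            rcases P with _ | ⟨c, cs⟩
            · exact absurd rfl hP
            rcases cs with _ | ⟨d, ds⟩
            · exfalso
              apply hnall
              have hc : c = '0' := by have := h0P; simp at this; exact this.symm
              simp [hc]
            · simp
          have hback : (if '0' ∈ P then P.length - 1 else 0) = P.length - 1 := if_pos h0P
          simp only [hback] at ih ⊢
          rw [if_pos (show P.length - 1 ≠ 0 by omega)]
          apply ih fa T' (i - (P.length - 1)) _ hz'
          · intro p hp
            exact no_occ_left hmin (by omega) (by omega) hP
          · omega
          · omega
        · -- '0' not in P: cursor jumps past the zeroed window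
          have hback : (if '0' ∈ P then P.length - 1 else 0) = 0 := if_neg h0P
          simp only [hback] at ih ⊢
          rw [if_neg (show ¬ ((0:Nat) ≠ 0) by simp)]
          apply ih fa T' (i + P.length) _ hz'
          · intro p hp
            by_cases hpl : p + P.length ≤ i
            · exact no_occ_left hmin (by omega) hpl hP
            · exact no_occ_overlap h0P hcond hp (by omega)
          · omega
          · omega
      · -- no match at i: advance cursor
        rw [if_neg hmatch]
        apply ih (fa + 1) T (i + 1) profit hz _ hA (by omega)
        intro p hp
        rcases Nat.lt_or_ge p i with h | h
        · exact hmin p h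
        · have : p = i := by omega
          subst this
          exact fun hq => hmatch ((occ_take_iff P T p).mp hq)
    · -- scan finished: no occurrence anywhere, A breaks immediately
      rw [if_neg hcond]
      have hno : ∀ p, ¬ P <+: T.drop p := by
        intro p hq
        have := occ_bound hP hq
        exact hmin p (by omega) hq
      rw [fLoopA, find_eq_neg hno, if_neg (by norm_num)]


theorem witness_ok : Dom_f (pvWitness_f.1) (pvWitness_f.2.1) (pvWitness_f.2.2.1) (pvWitness_f.2.2.2.1) (pvWitness_f.2.2.2.2.1) (pvWitness_f.2.2.2.2.2.1) (pvWitness_f.2.2.2.2.2.2) ∧ Pre_f (pvWitness_f.1) (pvWitness_f.2.1) (pvWitness_f.2.2.1) (pvWitness_f.2.2.2.1) (pvWitness_f.2.2.2.2.1) (pvWitness_f.2.2.2.2.2.1) (pvWitness_f.2.2.2.2.2.2) := by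
  constructor <;> decide

-- ===== VERDICT (by name: the statement is the Claim_ definition above) =====
theorem f_spec : Claim_equal_f := by
  unfold Claim_equal_f
  intro a b s t l r K _ hpre
  unfold Spec_f
  simp only [f, f_alt]
  unfold Pre_f at hpre
  set T := PySem.List.slice a.toList (some (s - 1)) (some t) with hT
  set P := PySem.List.slice b.toList (some (l - 1)) (some r) with hPdef
  obtain ⟨hP, hz⟩ := hpre
  have hz' : P.all (· = '0') = true → ∀ p, ¬ P <+: T.drop p := by
    intro hall p h
    have hin : PySem.Chars.isIn P T = true :=
      (PySem.Chars.exists_prefix_drop_iff_isIn P T).mp ⟨p, h⟩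
    rw [hz hall] at hin
    exact Bool.false_ne_true hin
  have hmul : P.length * (T.length - T.count '0') ≤ T.length * P.length := by
    calc P.length * (T.length - T.count '0') ≤ P.length * T.length :=
          Nat.mul_le_mul_left _ (Nat.sub_le _ _)
      _ = T.length * P.length := Nat.mul_comm _ _
  exact (loopB_eq_loopA P s K hP (T.length * P.length + 2 * T.length + 2) (T.length + 1)
    T 0 0 hz' (fun p hp => absurd hp (Nat.not_lt_zero p)) (by omega) (by omega)).symm
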